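-- pv_equiv track=rewrite | github.com/janu6ram/CP-Problems | 05-canqueenattack-Python/canqueenattack.py | left_up
-- ===== SOURCE A (Python) =====
-- def left_up(qr, qc, r, c):
--     row = qr
--     col = qc
--     while col != 9:
--         if row == r and col == c:
--             return True
--         row += 1
--         col += 1
--     return False
-- ===== SOURCE B (Python) =====
-- def left_up(qr, qc, r, c):
--     # closed-form down-right diagonal test: same diagonal offset, column within [qc, 8]
--     return qc <= c < 9 and r - qr == c - qc
-- ===== Notes on version B (the rewrite author's own statement) =====
-- stated objective: simpler
-- what changed: Replaces the step-by-step diagonal walk with a closed-form membership test (same diagonal offset and column within [qc,8]).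
import Mathlib
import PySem

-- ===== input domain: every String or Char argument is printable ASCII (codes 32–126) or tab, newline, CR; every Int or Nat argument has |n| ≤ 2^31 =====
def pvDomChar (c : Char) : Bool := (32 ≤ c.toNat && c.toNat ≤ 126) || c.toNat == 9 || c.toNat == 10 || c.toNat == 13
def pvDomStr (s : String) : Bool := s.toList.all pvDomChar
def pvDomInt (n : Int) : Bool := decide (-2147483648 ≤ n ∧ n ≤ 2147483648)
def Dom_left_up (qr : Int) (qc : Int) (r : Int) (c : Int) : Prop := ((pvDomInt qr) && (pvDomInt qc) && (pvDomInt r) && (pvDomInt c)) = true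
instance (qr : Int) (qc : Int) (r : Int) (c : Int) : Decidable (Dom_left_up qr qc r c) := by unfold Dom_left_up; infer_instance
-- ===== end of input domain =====

-- B replaces A's step-by-step diagonal walk with a closed-form test (simpler; return value only).

-- ===== PORT A =====
-- the while loop, fuel = number of iterations until col reaches 9 (exact when qc ≤ 9, i.e. inside Pre_)
def leftUpGo (r : Int) (c : Int) : Nat → Int → Int → Bool
  | 0, _, _ => false
  | n+1, row, col =>
    if col = 9 then false
    else if row = r && col = c then true
    else leftUpGo r c n (row + 1) (col + 1)

def left_up (qr : Int) (qc : Int) (r : Int) (c : Int) : Bool :=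
  leftUpGo r c (9 - qc).toNat qr qc

-- ===== PORT B =====
def left_up_alt (qr : Int) (qc : Int) (r : Int) (c : Int) : Bool :=
  decide (qc ≤ c ∧ c < 9 ∧ r - qr = c - qc)

-- ===== PRECONDITION & SPEC =====
-- Pre_ excludes qc > 9, on which A's while loop never terminates (col starts past 9 and only grows).
def Pre_left_up (qr : Int) (qc : Int) (r : Int) (c : Int) : Prop := qc ≤ 9
instance (qr : Int) (qc : Int) (r : Int) (c : Int) : Decidable (Pre_left_up qr qc r c) := by unfold Pre_left_up; infer_instance
def pvWitness_left_up : Int × Int × Int × Int := (2, 3, 5, 6)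

def Spec_left_up (qr : Int) (qc : Int) (r : Int) (c : Int) (out : Bool) : Prop := out = left_up_alt qr qc r c
instance (qr : Int) (qc : Int) (r : Int) (c : Int) (out : Bool) : Decidable (Spec_left_up qr qc r c out) := by unfold Spec_left_up; infer_instance

-- ===== CLAIM (what is proved, stated in full; the proofs are below) =====
def Claim_equal_left_up : Prop := ∀ (qr : Int) (qc : Int) (r : Int) (c : Int), Dom_left_up qr qc r c → Pre_left_up qr qc r c → Spec_left_up qr qc r c (left_up qr qc r c)

-- ===== LEMMAS AND PROOFS =====
theorem leftUpGo_closed (r c : Int) (n : Nat) :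
    ∀ row col : Int, col + n = 9 →
      leftUpGo r c n row col = decide (col ≤ c ∧ c < 9 ∧ r - row = c - col) := by
  induction n with
  | zero =>
    intro row col h
    simp only [leftUpGo]
    have : ¬ (col ≤ c ∧ c < 9 ∧ r - row = c - col) := by omega
    simp [this]
  | succ n ih =>
    intro row col h
    simp only [leftUpGo]
    by_cases h9 : col = 9
    · omega
    · simp only [h9, if_false]
      by_cases hrc : row = r ∧ col = c
      · have hgoal : col ≤ c ∧ c < 9 ∧ r - row = c - col := ⟨by omega, by omega, by omega⟩
        simp [hrc.1, hrc.2, hgoal]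
      · have hb : (decide (row = r) && decide (col = c)) = false := by
          rcases Decidable.not_and_iff_or_not.mp hrc with h1 | h1 <;> simp [h1]
        rw [hb]
        simp only [Bool.false_eq_true, if_false]
        rw [ih (row + 1) (col + 1) (by omega)]
        have hiff : (col + 1 ≤ c ∧ c < 9 ∧ r - (row + 1) = c - (col + 1)) ↔
            (col ≤ c ∧ c < 9 ∧ r - row = c - col) := by
          constructor
          · rintro ⟨h1, h2, h3⟩
            exact ⟨by omega, h2, by omega⟩
          · rintro ⟨h1, h2, h3⟩
            refine ⟨?_, h2, by omega⟩
            rcases lt_or_eq_of_le h1 with h1 | h1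
            · omega
            · exfalso; exact hrc ⟨by omega, h1⟩
        exact decide_eq_decide.mpr hiff

-- ===== VERDICT (by name: the statement is the Claim_ definition above) =====
theorem left_up_spec : Claim_equal_left_up := by
  intro qr qc r c _ hpre
  unfold Spec_left_up left_up left_up_alt
  have h : qc + ((9 - qc).toNat : Int) = 9 := by
    unfold Pre_left_up at hpre; omega
  exact leftUpGo_closed r c _ qr qc h
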